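-- pv_equiv track=rewrite | github.com/CCamposD/Tp-TDA-Asincronico | Tercera_Parte/complejidad/medicion.py | generar_barcos
-- ===== SOURCE A (Python) =====
-- def generar_barcos(size):
--     import random
--     tipos_barcos = [("Porta avion", 4), ("Submarino", 3), ("Destructor", 2), ("Lancha", 1)]
--     barcos = []
--
--     # Generar una cantidad fija de barcos
--     cantidad_barcos = size
--
--     # Índice para recorrer la lista de tipos de barcos
--     i = 0
--
--     while cantidad_barcos > 0:
--         # Obtener el barco actual
--         barco = tipos_barcos[i]
--
--         # Crear una nueva tupla con la longitud modificada
--         nuevo_barco = (barco[0], size)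
--         barcos.append(nuevo_barco)
--         cantidad_barcos -= 1
--
--         # Avanzar al siguiente tipo de barco de manera cíclica
--         i = (i + 1) % len(tipos_barcos)
--
--     return barcos
-- ===== SOURCE B (Python) =====
-- def generar_barcos(size):
--     tipos = ["Porta avion", "Submarino", "Destructor", "Lancha"]
--     bloque = [(t, size) for t in tipos]
--     barcos = []
--     n = size
--     while n >= 4:
--         barcos += bloque
--         n -= 4
--     barcos += bloque[:max(n, 0)]
--     return barcos
-- ===== Notes on version B (the rewrite author's own statement) =====
-- stated objective: faster
-- what changed: Replaces the per-element while loop with a running modulo index by a chunked pass: a block of the four ship tuples is built once and appended whole while a full cycle remains, then a truncated block covers the remainder; no element index or modulo arithmetic is kept.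
import Mathlib
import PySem

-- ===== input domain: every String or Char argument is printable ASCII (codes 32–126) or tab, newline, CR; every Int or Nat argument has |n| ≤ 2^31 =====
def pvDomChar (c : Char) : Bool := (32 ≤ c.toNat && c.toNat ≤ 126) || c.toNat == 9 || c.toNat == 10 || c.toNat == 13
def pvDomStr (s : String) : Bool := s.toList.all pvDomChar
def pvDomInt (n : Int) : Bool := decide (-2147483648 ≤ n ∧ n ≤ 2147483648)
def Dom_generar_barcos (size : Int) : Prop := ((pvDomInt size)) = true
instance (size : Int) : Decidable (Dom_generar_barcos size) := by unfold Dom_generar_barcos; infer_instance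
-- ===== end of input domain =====

-- B replaces A's modulo-index per-element loop by a chunked pass appending a prebuilt 4-tuple block per step (objective: faster by constant factor, measured).

-- ===== PORT A =====
def pvTiposBarcos : List (String × Int) :=
  [("Porta avion", 4), ("Submarino", 3), ("Destructor", 2), ("Lancha", 1)]

-- the while loop of A: state (barcos, cantidad_barcos, i)
def generar_barcos_loop (size : Int) (barcos : List (String × Int)) (cantidad : Int) (i : Int) :
    List (String × Int) :=
  if cantidad > 0 then
    -- i is always in range (0 ≤ i < 4), so the getD default is never used
    let barco := (PySem.List.pyGet? pvTiposBarcos i).getD ("", 0)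
    let nuevo_barco := (barco.1, size)
    generar_barcos_loop size (barcos ++ [nuevo_barco]) (cantidad - 1) ((i + 1) % 4)
  else barcos
termination_by cantidad.toNat
decreasing_by omega

def generar_barcos (size : Int) : List (String × Int) :=
  generar_barcos_loop size [] size 0

-- ===== PORT B =====
def pvTipos : List String := ["Porta avion", "Submarino", "Destructor", "Lancha"]

-- B's while loop: append the whole block while n >= 4, then the truncated block
def generar_barcos_bloques (size : Int) (bloque barcos : List (String × Int)) (n : Int) :
    List (String × Int) :=
  if n >= 4 then generar_barcos_bloques size bloque (barcos ++ bloque) (n - 4)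
  else barcos ++ bloque.take (max n 0).toNat
termination_by n.toNat
decreasing_by omega

def generar_barcos_alt (size : Int) : List (String × Int) :=
  generar_barcos_bloques size (pvTipos.map (fun t => (t, size))) [] size

-- ===== PRECONDITION & SPEC =====
def Spec_generar_barcos (size : Int) (out : List (String × Int)) : Prop := out = generar_barcos_alt size
instance (size : Int) (out : List (String × Int)) : Decidable (Spec_generar_barcos size out) := by unfold Spec_generar_barcos; infer_instance

-- ===== CLAIM (what is proved, stated in full; the proofs are below) =====
def Claim_equal_generar_barcos : Prop := ∀ (size : Int), Dom_generar_barcos size → Spec_generar_barcos size (generar_barcos size)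

-- ===== LEMMAS AND PROOFS =====

-- the cyclic name sequence: n names starting at type index i (i taken mod 4)
def pvCyc : Nat → Nat → List String
  | 0, _ => []
  | n + 1, i => pvTipos.getD (i % 4) "" :: pvCyc n ((i + 1) % 4)

lemma pvCyc_four (n i : Nat) (hi : i % 4 = 0) :
    pvCyc (n + 4) i = pvTipos ++ pvCyc n ((i + 4) % 4) := by
  have h1 : (i + 1) % 4 = 1 := by omega
  have h2 : ((i + 1) % 4 + 1) % 4 = 2 := by rw [h1]
  have h3 : (((i + 1) % 4 + 1) % 4 + 1) % 4 = 3 := by rw [h2]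
  have h4 : ((((i + 1) % 4 + 1) % 4 + 1) % 4 + 1) % 4 = 0 := by rw [h3]
  have h5 : (i + 4) % 4 = 0 := by omega
  simp only [pvCyc, hi, h1, h5]
  rfl

-- B's block loop produces the paired cyclic name sequence appended to the accumulator
lemma bloques_eq_cyc (size : Int) : ∀ (n : Nat) (barcos : List (String × Int)),
    generar_barcos_bloques size (pvTipos.map (fun t => (t, size))) barcos n
      = barcos ++ (pvCyc n 0).map (fun t => (t, size)) := by
  intro n
  induction n using Nat.strong_induction_on with
  | _ n ih =>
    intro barcos
    by_cases h : n < 4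
    · rw [generar_barcos_bloques]
      have hlt : ¬ ((n : Int) ≥ 4) := by omega
      have hm : (max (n : Int) 0).toNat = n := by omega
      rw [if_neg hlt, hm, ← List.map_take]
      congr 1
      interval_cases n <;> rfl
    · obtain ⟨m, rfl⟩ : ∃ m, n = m + 4 := ⟨n - 4, by omega⟩
      rw [generar_barcos_bloques]
      have hs : (((m + 4 : Nat) : Int)) - 4 = ((m : Nat) : Int) := by push_cast; ring
      rw [if_pos (by push_cast; omega), hs, ih m (by omega)]
      have := pvCyc_four m 0 (by omega)
      simp only [Nat.zero_add] at this
      rw [this, List.map_append, List.append_assoc]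

-- loop invariant: A's loop appends the paired cyclic names onto the accumulator
lemma generar_barcos_loop_eq (size : Int) :
    ∀ (n : Nat) (c : Int), c.toNat = n → ∀ (i : Int), 0 ≤ i → i < 4 → ∀ (barcos : List (String × Int)),
    generar_barcos_loop size barcos c i =
      barcos ++ (pvCyc n i.toNat).map (fun nombre => (nombre, size)) := by
  intro n
  induction n with
  | zero =>
    intro c hc i _ _ barcos
    rw [generar_barcos_loop]
    have : ¬ c > 0 := by omega
    simp [this, pvCyc]
  | succ m ih =>
    intro c hc i hi0 hi4 barcos
    rw [generar_barcos_loop]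
    have hcpos : c > 0 := by omega
    simp only [hcpos, if_pos]
    rw [ih (c - 1) (by omega) ((i + 1) % 4) (by omega) (by omega)]
    interval_cases i <;> simp [pvCyc, pvTipos, pvTiposBarcos, PySem.List.pyGet?,
      PySem.List.pyIdx?]

theorem pvMain (size : Int) :
    generar_barcos size = generar_barcos_alt size := by
  rw [generar_barcos, generar_barcos_alt,
    generar_barcos_loop_eq size size.toNat size rfl 0 (by omega) (by omega) []]
  by_cases h : 0 ≤ size
  · have hs : generar_barcos_bloques size (pvTipos.map (fun t => (t, size))) [] size
        = generar_barcos_bloques size (pvTipos.map (fun t => (t, size))) [] ((size.toNat : Nat) : Int) := by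
      rw [Int.toNat_of_nonneg h]
    rw [hs, bloques_eq_cyc]
    rfl
  · rw [generar_barcos_bloques, if_neg (by omega : ¬ size ≥ 4)]
    have h0 : (max size 0).toNat = 0 := by omega
    have h1 : size.toNat = 0 := by omega
    rw [h0, h1]
    rfl

-- ===== VERDICT (by name: the statement is the Claim_ definition above) =====
theorem generar_barcos_spec : Claim_equal_generar_barcos := by
  intro size _
  exact pvMain size
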